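-- pv_equiv track=rewrite | github.com/claytonjwong/Algorithms-UCSanDiego | course1/week3/6_max_num_prizes/python/main.py | maxNumPrizes
-- ===== SOURCE A (Python) =====
-- from typing import List
--
-- def maxNumPrizes( N: int ) -> List[int] :
--     ans = []
--     i = 1
--     while i+1 <= N-i:
--         ans.append( i )
--         N -= i
--         i += 1
--     if 0 < N:
--         ans.append( N )
--     return ans
-- ===== SOURCE B (Python) =====
-- def maxNumPrizes(N):
--     k = 0
--     while (k + 1) * (k + 2) <= 2 * N:
--         k += 1
--     if k == 0:
--         return []
--     return list(range(1, k)) + [N - (k - 1) * k // 2]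
-- ===== Notes on version B (the rewrite author's own statement) =====
-- stated objective: simpler
-- what changed: B first counts the number of summands k with a bare counter loop that runs while the next triangular number still fits in N, then builds the whole answer directly as list(range(1,k)) plus the single leftover element, instead of A's loop that appends each summand while mutating N.
import Mathlib
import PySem

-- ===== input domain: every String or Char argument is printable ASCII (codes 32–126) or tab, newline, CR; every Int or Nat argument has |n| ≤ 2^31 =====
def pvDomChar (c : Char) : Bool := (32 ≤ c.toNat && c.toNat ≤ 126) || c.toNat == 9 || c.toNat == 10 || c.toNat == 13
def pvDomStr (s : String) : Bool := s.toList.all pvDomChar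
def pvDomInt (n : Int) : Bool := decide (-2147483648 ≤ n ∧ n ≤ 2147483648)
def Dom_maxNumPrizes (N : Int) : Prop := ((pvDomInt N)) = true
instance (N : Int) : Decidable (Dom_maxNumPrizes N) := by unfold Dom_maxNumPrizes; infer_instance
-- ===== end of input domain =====

-- B replaces A's append-and-subtract loop by first counting the number of summands k
-- with a plain counter loop and then building the list directly from a range; objective: simpler.

-- ===== PORT A =====
-- while i+1 <= N-i: ans.append(i); N -= i; i += 1   (ans accumulates as the cons prefix)
def pvLoopA (N i : Int) : List Int :=
  if h : i + 1 ≤ N - i then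
    i :: pvLoopA (N - i) (i + 1)
  else if 0 < N then [N] else []
termination_by ((1 - i).toNat, (N - 2*i).toNat)
decreasing_by
  simp only [Prod.lex_iff]
  omega

def maxNumPrizes (N : Int) : List Int := pvLoopA N 1

-- ===== PORT B =====
-- while (k+1)*(k+2) <= 2*N: k += 1
def pvKLoop (N k : Int) : Int :=
  if h : (k + 1) * (k + 2) ≤ 2 * N then
    pvKLoop N (k + 1)
  else k
termination_by (N + 1 - k).toNat
decreasing_by
  have hk : k ≤ N := by nlinarith [sq_nonneg (2*k + 1)]
  omega

def maxNumPrizes_alt (N : Int) : List Int :=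
  if pvKLoop N 0 = 0 then []
  else PySem.List.pyRange 1 (pvKLoop N 0) 1
       ++ [N - PySem.Int.floordiv ((pvKLoop N 0 - 1) * pvKLoop N 0) 2]

-- ===== PRECONDITION & SPEC =====
def Spec_maxNumPrizes (N : Int) (out : List Int) : Prop := out = maxNumPrizes_alt N
instance (N : Int) (out : List Int) : Decidable (Spec_maxNumPrizes N out) := by unfold Spec_maxNumPrizes; infer_instance

-- ===== CLAIM (what is proved, stated in full; the proofs are below) =====
def Claim_equal_maxNumPrizes : Prop := ∀ (N : Int), Dom_maxNumPrizes N → Spec_maxNumPrizes N (maxNumPrizes N)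

-- ===== LEMMAS AND PROOFS =====

-- triangular numbers pvTri j = j*(j+1)/2 and the trailing leftover element
def pvTri (j : Int) : Int := j * (j + 1) / 2

def pvTail (N K : Int) : List Int :=
  if 0 < N - pvTri (K - 1) then [N - pvTri (K - 1)] else []

theorem pvTri_two_mul (j : Int) : 2 * pvTri j = j * (j + 1) := by
  unfold pvTri
  obtain ⟨r, hr⟩ := Int.even_mul_succ_self j
  omega

theorem pvKLoop_ge (N k : Int) : k ≤ pvKLoop N k := by
  rw [pvKLoop]
  by_cases h : (k + 1) * (k + 2) ≤ 2 * N
  · rw [dif_pos h]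
    have := pvKLoop_ge N (k + 1)
    omega
  · rw [dif_neg h]
termination_by (N + 1 - k).toNat
decreasing_by
  have hk : k ≤ N := by nlinarith [sq_nonneg (2*k + 1)]
  omega

theorem pvKLoop_last (N k : Int) (hc : (k + 1) * (k + 2) ≤ 2 * N) :
    pvKLoop N k * (pvKLoop N k + 1) ≤ 2 * N := by
  rw [pvKLoop, dif_pos hc]
  by_cases hc2 : (k + 1 + 1) * (k + 1 + 2) ≤ 2 * N
  · exact pvKLoop_last N (k + 1) hc2
  · rw [pvKLoop, dif_neg hc2]
    have he : (k + 1) * (k + 1 + 1) = (k + 1) * (k + 2) := by ring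
    omega
termination_by (N + 1 - k).toNat
decreasing_by
  have hk : k ≤ N := by nlinarith [sq_nonneg (2*k + 1)]
  omega

-- main invariant: A's loop from state (N0 - tri(i-1), i) yields range(i, K) plus the tail,
-- where K = pvKLoop N0 (i-1)
theorem pvMain (n : Nat) (N0 i : Int) (hn : (2 * N0 - i * (i + 1)).toNat = n)
    (h1 : 1 ≤ i) (h2 : i = 1 ∨ i * (i + 1) ≤ 2 * N0) :
    pvLoopA (N0 - pvTri (i - 1)) i
      = PySem.List.pyRange i (pvKLoop N0 (i - 1)) 1 ++ pvTail N0 (pvKLoop N0 (i - 1)) := by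
  induction n using Nat.strong_induction_on generalizing i with
  | _ n ih =>
    have htri : 2 * pvTri (i - 1) = (i - 1) * i := by
      have := pvTri_two_mul (i - 1)
      have he : (i - 1) * (i - 1 + 1) = (i - 1) * i := by ring
      omega
    have hexp : (i + 1) * (i + 2) = (i - 1) * i + (4 * i + 2) := by ring
    by_cases hc : i + 1 ≤ (N0 - pvTri (i - 1)) - i
    · -- loop body runs: the loop condition is equivalent to (i+1)*(i+2) ≤ 2*N0
      have hcond : (i + 1) * (i + 2) ≤ 2 * N0 := by omega
      have hx : (i - 1 + 1) * (i - 1 + 2) ≤ 2 * N0 := by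
        have he : (i - 1 + 1) * (i - 1 + 2) = i * (i + 1) := by ring
        have he2 : (i + 1) * (i + 2) = i * (i + 1) + 2 * (i + 1) := by ring
        omega
      have hstep : pvKLoop N0 (i - 1) = pvKLoop N0 i := by
        rw [pvKLoop, dif_pos hx]
        congr 1
        ring
      have hKgt : i < pvKLoop N0 i := by
        have he : pvKLoop N0 i = pvKLoop N0 (i + 1) := by rw [pvKLoop, dif_pos hcond]
        have := pvKLoop_ge N0 (i + 1)
        omega
      have hstep2 : pvKLoop N0 i = pvKLoop N0 (i + 1 - 1) := by
        congr 1
        ring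
      have htri2 : pvTri (i + 1 - 1) = pvTri (i - 1) + i := by
        have ht : pvTri (i + 1 - 1) = pvTri i := by congr 1; ring
        have h1' := pvTri_two_mul i
        have he : i * (i + 1) = (i - 1) * i + 2 * i := by ring
        omega
      have hrec : pvLoopA (N0 - pvTri (i - 1)) i
          = i :: pvLoopA (N0 - pvTri (i - 1) - i) (i + 1) := by
        rw [pvLoopA, dif_pos hc]
      have harg : N0 - pvTri (i - 1) - i = N0 - pvTri (i + 1 - 1) := by omega
      have hm : (2 * N0 - (i + 1) * (i + 1 + 1)).toNat < n := by
        subst hn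
        have he : (i + 1) * (i + 1 + 1) = (i + 1) * (i + 2) := by ring
        have h3 : i * (i + 1) < (i + 1) * (i + 2) := by nlinarith
        omega
      have hih := ih _ hm (i + 1) rfl (by omega) (Or.inr (by nlinarith))
      have hK' : i < pvKLoop N0 (i - 1) := by rw [hstep]; exact hKgt
      rw [hrec, harg, hih, ← hstep2, ← hstep,
        PySem.List.pyRange_one_cons hK']
      simp
    · -- loop stops
      have hcond : ¬ (i + 1) * (i + 2) ≤ 2 * N0 := by omega
      by_cases hK0 : i * (i + 1) ≤ 2 * N0
      · have hK : pvKLoop N0 (i - 1) = i := by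
          have hx : (i - 1 + 1) * (i - 1 + 2) ≤ 2 * N0 := by
            have he : (i - 1 + 1) * (i - 1 + 2) = i * (i + 1) := by ring
            omega
          have hy : ¬ (i - 1 + 1 + 1) * (i - 1 + 1 + 2) ≤ 2 * N0 := by
            have he : (i - 1 + 1 + 1) * (i - 1 + 1 + 2) = (i + 1) * (i + 2) := by ring
            omega
          rw [pvKLoop, dif_pos hx, pvKLoop, dif_neg hy]
          ring
        rw [pvLoopA, dif_neg hc, hK, PySem.List.pyRange_one_eq_nil (le_refl i)]
        unfold pvTail
        simp
      · have hi : i = 1 := by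
          rcases h2 with h | h
          · exact h
          · exact absurd h hK0
        subst hi
        have hN0 : N0 ≤ 0 := by
          have he : (1 : Int) * (1 + 1) = 2 := by norm_num
          omega
        have hK : pvKLoop N0 (1 - 1) = 1 - 1 := by
          rw [pvKLoop]
          refine dif_neg ?_
          intro h
          have he : ((1 : Int) - 1 + 1) * (1 - 1 + 2) = 2 := by norm_num
          omega
        have ht0 : pvTri ((1 : Int) - 1) = 0 := by unfold pvTri; norm_num
        have ht1 : pvTri ((1 : Int) - 1 - 1) = 0 := by unfold pvTri; norm_num
        rw [pvLoopA, dif_neg hc, hK, PySem.List.pyRange_one_eq_nil (by norm_num)]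
        unfold pvTail
        rw [ht0, ht1]
        simp

theorem pvAlt_char (N : Int) :
    maxNumPrizes_alt N = PySem.List.pyRange 1 (pvKLoop N 0) 1 ++ pvTail N (pvKLoop N 0) := by
  by_cases h0 : (0 + 1 : Int) * (0 + 2) ≤ 2 * N
  · have hK1 : 1 ≤ pvKLoop N 0 := by
      have he : pvKLoop N 0 = pvKLoop N (0 + 1) := by rw [pvKLoop, dif_pos h0]
      have := pvKLoop_ge N (0 + 1)
      omega
    have hlast : pvKLoop N 0 * (pvKLoop N 0 + 1) ≤ 2 * N := pvKLoop_last N 0 h0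
    have htri : 2 * pvTri (pvKLoop N 0 - 1) = (pvKLoop N 0 - 1) * pvKLoop N 0 := by
      have := pvTri_two_mul (pvKLoop N 0 - 1)
      have he : (pvKLoop N 0 - 1) * (pvKLoop N 0 - 1 + 1) = (pvKLoop N 0 - 1) * pvKLoop N 0 := by
        ring
      omega
    have hpos : 0 < N - pvTri (pvKLoop N 0 - 1) := by
      have he : pvKLoop N 0 * (pvKLoop N 0 + 1)
          = (pvKLoop N 0 - 1) * pvKLoop N 0 + 2 * pvKLoop N 0 := by ring
      omega
    have hfd : PySem.Int.floordiv ((pvKLoop N 0 - 1) * pvKLoop N 0) 2 = pvTri (pvKLoop N 0 - 1) := by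
      rw [PySem.Int.floordiv_eq_ediv_of_pos (by norm_num)]
      unfold pvTri
      congr 1
      ring
    unfold maxNumPrizes_alt
    rw [if_neg (by omega), hfd]
    unfold pvTail
    rw [if_pos hpos]
  · have hK : pvKLoop N 0 = 0 := by rw [pvKLoop]; exact dif_neg h0
    have hN : N ≤ 0 := by
      have he : ((0 : Int) + 1) * (0 + 2) = 2 := by norm_num
      omega
    unfold maxNumPrizes_alt
    rw [if_pos hK, hK, PySem.List.pyRange_one_eq_nil (by norm_num)]
    unfold pvTail pvTri
    norm_num
    omega

-- ===== VERDICT (by name: the statement is the Claim_ definition above) =====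
theorem maxNumPrizes_spec : Claim_equal_maxNumPrizes := by
  intro N _
  unfold Spec_maxNumPrizes maxNumPrizes
  have hmain := pvMain ((2 * N - 1 * (1 + 1)).toNat) N 1 rfl (by norm_num) (Or.inl rfl)
  have h0 : pvTri ((1 : Int) - 1) = 0 := by unfold pvTri; norm_num
  rw [h0, sub_zero] at hmain
  have e : (1 : Int) - 1 = 0 := by norm_num
  rw [e] at hmain
  rw [hmain, pvAlt_char]
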